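-- pv_equiv track=rewrite | github.com/gnoffl/tsx | tsx/models/forecaster/ospgsm.py | split_zero
-- ===== SOURCE A (Python) =====
-- def split_zero(arr, min_size=1):
--     f, t = 0, 0
--     splits = []
--
--     for idx in range(len(arr)):
--         if arr[idx] == 0:
--             if (t-f) > min_size:
--                 splits.append((f, t-1))
--             f = idx + 1
--             t = idx + 1
--         else:
--             t += 1
--
--     # If last salient segment extends to the end:
--     if t == len(arr) and (t-f) > min_size:
--         splits.append((f, t-1))
--
--     return splits
-- ===== SOURCE B (Python) =====
-- def split_zero(arr, min_size=1):
--     boundaries = [-1] + [i for i in range(len(arr)) if arr[i] == 0] + [len(arr)]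
--     splits = []
--     for a, b in zip(boundaries, boundaries[1:]):
--         if b - a - 1 > min_size:
--             splits.append((a + 1, b - 1))
--     return splits
-- ===== Notes on version B (the rewrite author's own statement) =====
-- stated objective: alternative
-- what changed: Replaces A's single-scan two-pointer (f,t) state machine by first materialising the list of zero positions with sentinels -1 and len(arr), then emitting one segment per consecutive boundary pair whose gap exceeds min_size.
import Mathlib
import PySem

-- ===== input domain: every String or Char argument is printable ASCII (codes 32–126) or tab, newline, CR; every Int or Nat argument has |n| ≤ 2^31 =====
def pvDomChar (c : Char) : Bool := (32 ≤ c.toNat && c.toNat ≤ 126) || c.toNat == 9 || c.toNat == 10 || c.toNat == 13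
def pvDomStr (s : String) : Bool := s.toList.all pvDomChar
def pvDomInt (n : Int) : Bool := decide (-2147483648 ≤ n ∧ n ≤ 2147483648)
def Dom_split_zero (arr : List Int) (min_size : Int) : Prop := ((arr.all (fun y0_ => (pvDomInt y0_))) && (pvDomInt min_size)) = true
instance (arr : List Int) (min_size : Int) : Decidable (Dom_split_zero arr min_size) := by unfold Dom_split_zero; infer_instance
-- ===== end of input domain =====

-- B replaces A's two-pointer scan by a zero-boundary table with sentinels and a pass
-- over consecutive boundary pairs (alternative decomposition, same O(n) cost).

-- ===== PORT A =====
-- literal transliteration of A's index loop with state (f, t, splits)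
def split_zero (arr : List Int) (min_size : Int) : List (Int × Int) :=
  let st :=
    (PySem.List.pyRange 0 (arr.length : Int) 1).foldl
      (fun (s : Int × Int × List (Int × Int)) idx =>
        let f := s.1; let t := s.2.1; let splits := s.2.2
        if PySem.List.pyGetD arr idx 0 = 0 then
          if t - f > min_size then (idx + 1, idx + 1, splits ++ [(f, t - 1)])
          else (idx + 1, idx + 1, splits)
        else (f, t + 1, splits))
      (0, 0, [])
  let f := st.1; let t := st.2.1; let splits := st.2.2
  if t = (arr.length : Int) ∧ t - f > min_size then splits ++ [(f, t - 1)]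
  else splits

-- ===== PORT B =====
-- literal transliteration of Source B: boundary list with sentinels, pass over consecutive pairs
def split_zero_alt (arr : List Int) (min_size : Int) : List (Int × Int) :=
  let boundaries : List Int :=
    [-1] ++ ((PySem.List.pyRange 0 (arr.length : Int) 1).filter
              (fun i => PySem.List.pyGetD arr i 0 = 0)) ++ [(arr.length : Int)]
  (boundaries.zip boundaries.tail).foldl
    (fun (splits : List (Int × Int)) p =>
      if p.2 - p.1 - 1 > min_size then splits ++ [(p.1 + 1, p.2 - 1)] else splits)
    []

-- ===== PRECONDITION & SPEC =====
def Spec_split_zero (arr : List Int) (min_size : Int) (out : List (Int × Int)) : Prop := out = split_zero_alt arr min_size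
instance (arr : List Int) (min_size : Int) (out : List (Int × Int)) : Decidable (Spec_split_zero arr min_size out) := by unfold Spec_split_zero; infer_instance

-- ===== CLAIM (what is proved, stated in full; the proofs are below) =====
def Claim_equal_split_zero : Prop := ∀ (arr : List Int) (min_size : Int), Dom_split_zero arr min_size → Spec_split_zero arr min_size (split_zero arr min_size)

-- ===== LEMMAS AND PROOFS =====

-- last element of l with default a
def pvLastD (a : Int) (l : List Int) : Int :=
  match l with
  | [] => a
  | b :: t => pvLastD b t

theorem pvLastD_append (a : Int) (l : List Int) (x : Int) :
    pvLastD a (l ++ [x]) = x := by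
  induction l generalizing a with
  | nil => rfl
  | cons b t ih => simpa [pvLastD] using ih b

theorem zip_tail_append (a : Int) (l : List Int) (x : Int) :
    ((a :: l) ++ [x]).zip (l ++ [x]) = (a :: l).zip l ++ [(pvLastD a l, x)] := by
  induction l generalizing a with
  | nil => rfl
  | cons b t ih => simpa [pvLastD, List.zip] using ih b

-- abbreviations for the invariant (fixed arr, min_size)
def pvZeros (arr : List Int) (n : Nat) : List Int :=
  (PySem.List.pyRange 0 (n : Int) 1).filter (fun i => PySem.List.pyGetD arr i 0 = 0)

def pvStepB (min_size : Int) (splits : List (Int × Int)) (p : Int × Int) : List (Int × Int) :=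
  if p.2 - p.1 - 1 > min_size then splits ++ [(p.1 + 1, p.2 - 1)] else splits

def pvPartial (arr : List Int) (min_size : Int) (n : Nat) : List (Int × Int) :=
  (((-1) :: pvZeros arr n).zip (pvZeros arr n)).foldl (pvStepB min_size) []

theorem pvZeros_succ (arr : List Int) (n : Nat) :
    pvZeros arr (n + 1) =
      pvZeros arr n ++ (if PySem.List.pyGetD arr (n : Int) 0 = 0 then [(n : Int)] else []) := by
  unfold pvZeros
  rw [show ((n + 1 : Nat) : Int) = (n : Int) + 1 by push_cast; ring,
    PySem.List.pyRange_one_succ_right (by positivity), List.filter_append]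
  congr 1
  rw [List.filter_singleton]
  split_ifs with h1 <;> simp_all

theorem pv_inv (arr : List Int) (min_size : Int) (n : Nat) :
    (PySem.List.pyRange 0 (n : Int) 1).foldl
      (fun (s : Int × Int × List (Int × Int)) idx =>
        let f := s.1; let t := s.2.1; let splits := s.2.2
        if PySem.List.pyGetD arr idx 0 = 0 then
          if t - f > min_size then (idx + 1, idx + 1, splits ++ [(f, t - 1)])
          else (idx + 1, idx + 1, splits)
        else (f, t + 1, splits))
      (0, 0, [])
    = (pvLastD (-1) (pvZeros arr n) + 1, (n : Int), pvPartial arr min_size n) := by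
  induction n with
  | zero => simp [PySem.List.pyRange_one_eq_nil, pvZeros, pvPartial, pvLastD]
  | succ n ih =>
    rw [show ((n + 1 : Nat) : Int) = (n : Int) + 1 by push_cast; ring,
      PySem.List.pyRange_one_succ_right (by positivity), List.foldl_append, ih]
    by_cases h : PySem.List.pyGetD arr (n : Int) 0 = 0
    · have hz : pvZeros arr (n + 1) = pvZeros arr n ++ [(n : Int)] := by
        rw [pvZeros_succ, if_pos h]
      have hp : pvPartial arr min_size (n + 1) =
          pvStepB min_size (pvPartial arr min_size n) (pvLastD (-1) (pvZeros arr n), (n : Int)) := by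
        unfold pvPartial
        rw [hz, show (-1 : Int) :: (pvZeros arr n ++ [(n : Int)]) =
              ((-1 : Int) :: pvZeros arr n) ++ [(n : Int)] by simp,
          zip_tail_append, List.foldl_append]
        rfl
      simp only [List.foldl_cons, List.foldl_nil]
      rw [if_pos h, hz, pvLastD_append, hp]
      unfold pvStepB
      dsimp only
      by_cases hc : (n : Int) - (pvLastD (-1) (pvZeros arr n) + 1) > min_size
      · rw [if_pos hc, if_pos (by omega)]
      · rw [if_neg hc, if_neg (by omega)]
    · have hz : pvZeros arr (n + 1) = pvZeros arr n := by
        rw [pvZeros_succ, if_neg h]; simp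
      have hp : pvPartial arr min_size (n + 1) = pvPartial arr min_size n := by
        unfold pvPartial; rw [hz]
      simp only [List.foldl_cons, List.foldl_nil]
      rw [if_neg h, hz, hp]

theorem split_zero_eq_alt (arr : List Int) (min_size : Int) :
    split_zero arr min_size = split_zero_alt arr min_size := by
  unfold split_zero
  rw [pv_inv arr min_size arr.length]
  show (if (arr.length : Int) = (arr.length : Int) ∧
          (arr.length : Int) - (pvLastD (-1) (pvZeros arr arr.length) + 1) > min_size then
        pvPartial arr min_size arr.length ++
          [(pvLastD (-1) (pvZeros arr arr.length) + 1, (arr.length : Int) - 1)]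
      else pvPartial arr min_size arr.length)
    = ((((-1 : Int) :: pvZeros arr arr.length) ++ [(arr.length : Int)]).zip
        (pvZeros arr arr.length ++ [(arr.length : Int)])).foldl (pvStepB min_size) []
  rw [zip_tail_append, List.foldl_append]
  show _ = pvStepB min_size (pvPartial arr min_size arr.length)
      (pvLastD (-1) (pvZeros arr arr.length), (arr.length : Int))
  unfold pvStepB
  dsimp only
  set L := pvLastD (-1) (pvZeros arr arr.length) with hL
  by_cases hc : (arr.length : Int) - L - 1 > min_size
  · rw [if_pos hc, if_pos ⟨rfl, by omega⟩]
  · rw [if_neg hc, if_neg (by omega)]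

-- ===== VERDICT (by name: the statement is the Claim_ definition above) =====
theorem split_zero_spec : Claim_equal_split_zero := by
  intro arr min_size _
  unfold Spec_split_zero
  exact split_zero_eq_alt arr min_size
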